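-- pv_equiv track=rewrite | github.com/galdiuz/nethys-search | elastic.py | get_rarity
-- ===== SOURCE A (Python) =====
-- def get_rarity(traits) -> str:
--     rarities = [
--         'uncommon',
--         'rare',
--         'unique',
--     ]
--     traits = [ t.lower() for t in traits ]
--
--     for rarity in rarities:
--         if rarity in traits:
--             return rarity
--
--     return 'common'
-- ===== SOURCE B (Python) =====
-- def get_rarity(traits) -> str:
--     rarities = ['uncommon', 'rare', 'unique']
--     rank = {r: i for i, r in enumerate(rarities)}
--     best = len(rarities)
--     for t in traits:
--         r = rank.get(t.lower())
--         if r is not None and r < best: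
--             best = r
--     return rarities[best] if best < len(rarities) else 'common'
-- ===== Notes on version B (the rewrite author's own statement) =====
-- stated objective: alternative
-- what changed: Single pass over the traits maintaining a running minimum rarity rank looked up in a priority dict, instead of building a lowercased copy of the traits and scanning it once per rarity string.
import Mathlib
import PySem

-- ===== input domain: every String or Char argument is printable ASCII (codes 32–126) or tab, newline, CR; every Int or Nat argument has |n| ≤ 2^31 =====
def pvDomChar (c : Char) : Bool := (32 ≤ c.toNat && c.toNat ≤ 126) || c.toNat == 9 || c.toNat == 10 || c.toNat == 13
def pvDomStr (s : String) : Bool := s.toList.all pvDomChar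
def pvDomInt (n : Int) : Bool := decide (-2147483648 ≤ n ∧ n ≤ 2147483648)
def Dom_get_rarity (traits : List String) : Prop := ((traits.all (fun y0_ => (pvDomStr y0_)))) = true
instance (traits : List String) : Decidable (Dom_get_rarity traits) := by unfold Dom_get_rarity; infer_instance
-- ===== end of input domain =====

-- ===== PORT A =====
-- traits = [t.lower() for t in traits]; for rarity in rarities: if rarity in traits: return rarity; return 'common'
def get_rarity (traits : List String) : String :=
  let ts := traits.map PySem.Str.lower
  match (["uncommon", "rare", "unique"] : List String).find? (fun r => ts.contains r) with
  | some r => r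
  | none => "common"

-- ===== PORT B =====
-- priority dict rank; one pass keeping the minimum rank found; index into rarities at the end
def pvRankDict : PySem.Dict String Nat :=
  PySem.Dict.ofList [("uncommon", 0), ("rare", 1), ("unique", 2)]

def pvStep (best : Nat) (t : String) : Nat :=
  match pvRankDict.get? (PySem.Str.lower t) with
  | some r => if r < best then r else best
  | none => best

def get_rarity_alt (traits : List String) : String :=
  let best := traits.foldl pvStep 3
  if best < 3 then (["uncommon", "rare", "unique"] : List String).getD best "" else "common"

-- ===== PRECONDITION & SPEC =====
def Spec_get_rarity (traits : List String) (out : String) : Prop := out = get_rarity_alt traits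
instance (traits : List String) (out : String) : Decidable (Spec_get_rarity traits out) := by unfold Spec_get_rarity; infer_instance

-- ===== CLAIM (what is proved, stated in full; the proofs are below) =====
def Claim_equal_get_rarity : Prop := ∀ (traits : List String), Dom_get_rarity traits → Spec_get_rarity traits (get_rarity traits)

-- ===== LEMMAS AND PROOFS =====

-- rank of a single (already lowercased) trait; 3 = no rarity trait
def pvRk (s : String) : Nat :=
  if s = "uncommon" then 0 else if s = "rare" then 1 else if s = "unique" then 2 else 3

-- membership-style rank of a lowercased trait list (mirrors A's scan order)
def pvRankMem (L : List String) : Nat :=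
  if "uncommon" ∈ L then 0 else if "rare" ∈ L then 1 else if "unique" ∈ L then 2 else 3

theorem pvRk_le (s : String) : pvRk s ≤ 3 := by
  unfold pvRk; split_ifs <;> omega

theorem pvRankDict_eq :
    pvRankDict = PySem.Dict.mk [("uncommon", 0), ("rare", 1), ("unique", 2)] := by
  decide

theorem pvStep_eq (b : Nat) (t : String) (hb : b ≤ 3) :
    pvStep b t = min b (pvRk (PySem.Str.lower t)) := by
  unfold pvStep pvRk
  rw [pvRankDict_eq]
  by_cases h1 : PySem.Str.lower t = "uncommon"
  · simp [PySem.Dict.get?, List.find?, h1]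
  have e1 : ("uncommon" == PySem.Str.lower t) = false := by
    rw [beq_eq_false_iff_ne]; exact fun h => h1 h.symm
  by_cases h2 : PySem.Str.lower t = "rare"
  · simp [PySem.Dict.get?, List.find?, h2]; split_ifs <;> omega
  have e2 : ("rare" == PySem.Str.lower t) = false := by
    rw [beq_eq_false_iff_ne]; exact fun h => h2 h.symm
  by_cases h3 : PySem.Str.lower t = "unique"
  · simp [PySem.Dict.get?, List.find?, h3]; split_ifs <;> omega
  have e3 : ("unique" == PySem.Str.lower t) = false := by
    rw [beq_eq_false_iff_ne]; exact fun h => h3 h.symm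
  simp [PySem.Dict.get?, List.find?, e1, e2, e3, h1, h2, h3]; omega

theorem pvFold_min (ts : List String) : ∀ b : Nat, b ≤ 3 →
    ts.foldl pvStep b = min b (ts.foldl pvStep 3) := by
  induction ts with
  | nil => intro b hb; simp; omega
  | cons t ts ih =>
    intro b hb
    have h3 := pvRk_le (PySem.Str.lower t)
    have hbt : pvStep b t ≤ 3 := by rw [pvStep_eq b t hb]; omega
    have h3t : pvStep 3 t ≤ 3 := by rw [pvStep_eq 3 t (le_refl 3)]; omega
    simp only [List.foldl_cons]
    rw [ih _ hbt, ih _ h3t, pvStep_eq b t hb, pvStep_eq 3 t (le_refl 3)]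
    omega

theorem pvRankMem_cons (s : String) (L : List String) :
    pvRankMem (s :: L) = min (pvRk s) (pvRankMem L) := by
  unfold pvRankMem pvRk
  simp only [List.mem_cons]
  split_ifs <;> simp_all

theorem pvFold_rank (ts : List String) :
    ts.foldl pvStep 3 = pvRankMem (ts.map PySem.Str.lower) := by
  induction ts with
  | nil => simp [pvRankMem]
  | cons t ts ih =>
    simp only [List.foldl_cons, List.map_cons]
    have h3 := pvRk_le (PySem.Str.lower t)
    have h3t : pvStep 3 t ≤ 3 := by rw [pvStep_eq 3 t (le_refl 3)]; omega
    rw [pvFold_min ts _ h3t, pvStep_eq 3 t (le_refl 3), pvRankMem_cons, ih]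
    omega


-- ===== VERDICT (by name: the statement is the Claim_ definition above) =====
theorem get_rarity_spec : Claim_equal_get_rarity := by
  intro traits _
  unfold Spec_get_rarity get_rarity get_rarity_alt
  rw [pvFold_rank]
  unfold pvRankMem
  by_cases h1 : "uncommon" ∈ traits.map PySem.Str.lower <;>
    by_cases h2 : "rare" ∈ traits.map PySem.Str.lower <;>
      by_cases h3 : "unique" ∈ traits.map PySem.Str.lower <;>
        simp [h1, h2, h3, List.find?]
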